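-- pv_equiv track=rewrite | github.com/0VERRIDER/FlightAssist | core/utils/seat_util.py | get_seat_type_from_seat_number
-- ===== SOURCE A (Python) =====
-- def slice_list(original_list, pattern_list):
--     sliced_list = []
--     start_index = 0
--
--     for slice_length in pattern_list:
--         end_index = start_index + slice_length
--         sliced_list.append(original_list[start_index:end_index])
--         start_index = end_index
--
--     return sliced_list
--
-- def get_seat_type_from_seat_arrangement(seat_arrangement):
--   middle = []
--   aisle = []
--   window = [1]
--
--   seat_row = [i for i in range(1,sum(seat_arrangement)+1)]
--   window.extend([seat_row[-1]])
--   seat_row = [i for i in seat_row if i not in window ]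
--   seat_arrangement[0] -= 1
--   seat_arrangement[-1] -= 1
--
--   seat_sections = slice_list(seat_row, seat_arrangement)
--
--   for seats in seat_sections:
--     if len(seats) > 0:
--       aisle.append(seats[0])
--       aisle.append(seats[-1])
--
--       seats= [i for i in seats if i not in aisle ]
--
--       for seat in seats:
--         middle.append(seat)
--   return (window,middle,aisle)
--
-- def get_seat_type_from_seat_number(seat_arrangement, seatnumbers):
--     window, middle, aisle = get_seat_type_from_seat_arrangement(seat_arrangement)
--
--     middle_set = set(middle)
--     aisle_set = set(aisle)
--     window_set = set(window)
--
--     seat_types = ["M" if to_num(seatnumber[-1]) in middle_set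
--                   else "A" if to_num(seatnumber[-1]) in aisle_set
--                   else "W" if to_num(seatnumber[-1]) in window_set
--                   else "Invalid_seat"
--                   for seatnumber in seatnumbers]
--
--     return seat_types
--
-- def to_num(letter):
--   return ord(letter) - 64
-- ===== SOURCE B (Python) =====
-- def get_seat_type_from_seat_number(seat_arrangement, seatnumbers):
--     # Same in-place mutation as the original (including the double decrement
--     # on a single-element list); classification is done arithmetically per
--     # seat instead of materialising the window/middle/aisle seat lists.
--     total = sum(seat_arrangement)
--     seat_arrangement[0] -= 1
--     seat_arrangement[-1] -= 1
--
--     def classify(c):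
--         if c == 1 or c == total:
--             return "W"
--         if 2 <= c <= total - 1:
--             p, s = c - 2, 0
--             for l in seat_arrangement:
--                 if p < s + l:
--                     return "A" if (p == s or p == s + l - 1) else "M"
--                 s += l
--         return "Invalid_seat"
--
--     return [classify(ord(sn[-1]) - 64) for sn in seatnumbers]
-- ===== Notes on version B (the rewrite author's own statement) =====
-- stated objective: faster
-- what changed: Instead of materialising the seat-row [1..sum], slicing it into section lists and collecting window/middle/aisle seat lists into sets (all of size sum(seat_arrangement)), B classifies each queried seat's column arithmetically: window if c is 1 or the total, otherwise one scan of the (mutated) section widths with a running offset decides aisle/middle; no list of size sum(seat_arrangement) is built.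
-- outside the precondition, e.g. on get_seat_type_from_seat_number([1, 0, 5, 0, 0], ['1F', '1E', '1B']): A returns ['W', 'A', 'A'], B returns ['W', 'M', 'A']
import Mathlib
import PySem

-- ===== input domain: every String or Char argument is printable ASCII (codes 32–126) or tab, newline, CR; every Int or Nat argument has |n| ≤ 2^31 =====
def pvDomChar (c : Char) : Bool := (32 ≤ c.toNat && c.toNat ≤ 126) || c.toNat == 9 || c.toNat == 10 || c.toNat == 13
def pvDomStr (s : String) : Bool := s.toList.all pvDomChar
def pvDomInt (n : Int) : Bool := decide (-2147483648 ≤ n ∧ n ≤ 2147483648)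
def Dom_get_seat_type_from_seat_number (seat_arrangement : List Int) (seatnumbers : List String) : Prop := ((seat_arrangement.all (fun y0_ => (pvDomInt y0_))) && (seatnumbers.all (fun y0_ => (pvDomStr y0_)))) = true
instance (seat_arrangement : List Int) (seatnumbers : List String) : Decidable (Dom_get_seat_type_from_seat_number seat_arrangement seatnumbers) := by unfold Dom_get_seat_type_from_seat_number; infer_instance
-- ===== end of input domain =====

-- B replaces A's materialised seat-row, section slices and window/middle/aisle seat lists
-- (all of size sum(seat_arrangement)) by a per-seat arithmetic classification (one scan of the
-- mutated section widths), which a timing run measured much faster for large seat counts.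
-- A also mutates seat_arrangement in place; B's Python performs the same mutation, and the
-- equivalence proved here is about the return value.

-- ===== PORT A =====
-- to_num(letter) = ord(letter) - 64
def pvToNumA (c : Char) : Int := (c.toNat : Int) - 64

-- slice_list(original_list, pattern_list): the loop over pattern_list carrying start_index
def pvSliceListA (orig : List Int) : List Int → Int → List (List Int)
  | [], _ => []
  | l :: rest, s => PySem.List.slice orig (some s) (some (s + l)) :: pvSliceListA orig rest (s + l)

-- the body of the 'for seats in seat_sections' loop; acc = (middle, aisle).
-- seats[0] / seats[-1] are only read under the 'len(seats) > 0' guard, so the .getD defaults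
-- are unreachable.
def pvFoldA (acc : List Int × List Int) (seats : List Int) : List Int × List Int :=
  if seats.length > 0 then
    let aisle := acc.2 ++ [(PySem.List.pyGet? seats 0).getD 0] ++ [(PySem.List.pyGet? seats (-1)).getD 0]
    let seats := seats.filter (fun i => !aisle.contains i)
    (acc.1 ++ seats, aisle)
  else acc

-- get_seat_type_from_seat_arrangement(seat_arrangement) = (window, middle, aisle).
-- The .getD 0 stands where Python raises IndexError (seat_row[-1] on empty seat_row, the
-- in-place decrements on an empty list); those inputs are excluded by Pre_.
def pvArrangeA (sa : List Int) : List Int × List Int × List Int :=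
  let middle : List Int := []
  let aisle : List Int := []
  let window : List Int := [1]
  let seat_row := PySem.List.pyRange 1 (sa.sum + 1) 1
  let window := window ++ [(PySem.List.pyGet? seat_row (-1)).getD 0]
  let seat_row := seat_row.filter (fun i => !window.contains i)
  let sa1 := PySem.List.pySetD sa 0 (PySem.List.pyGetD sa 0 0 - 1)         -- seat_arrangement[0] -= 1
  let sa2 := PySem.List.pySetD sa1 (-1) (PySem.List.pyGetD sa1 (-1) 0 - 1) -- seat_arrangement[-1] -= 1
  let seat_sections := pvSliceListA seat_row sa2 0
  let res := seat_sections.foldl pvFoldA (middle, aisle)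
  (window, res.1, res.2)

def get_seat_type_from_seat_number (seat_arrangement : List Int) (seatnumbers : List String) : List String :=
  let wma := pvArrangeA seat_arrangement
  let middle_set := PySem.Set.ofList wma.2.1
  let aisle_set := PySem.Set.ofList wma.2.2
  let window_set := PySem.Set.ofList wma.1
  seatnumbers.map (fun sn =>
    if middle_set.contains (pvToNumA ((PySem.Str.pyGet? sn (-1)).getD ' ')) then "M"
    else if aisle_set.contains (pvToNumA ((PySem.Str.pyGet? sn (-1)).getD ' ')) then "A"
    else if window_set.contains (pvToNumA ((PySem.Str.pyGet? sn (-1)).getD ' ')) then "W"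
    else "Invalid_seat")

-- ===== PORT B =====
def pvToNumB (c : Char) : Int := (c.toNat : Int) - 64

-- seat_arrangement[-1] -= 1
def pvDecLastB : List Int → List Int
  | [] => []
  | [a] => [a - 1]
  | a :: b :: rest => a :: pvDecLastB (b :: rest)

-- both in-place decrements (the double decrement on a single-element list)
def pvMutateB : List Int → List Int
  | [] => []
  | [a] => [a - 2]
  | a :: b :: rest => (a - 1) :: pvDecLastB (b :: rest)

-- the scan over the section widths: p = 0-based interior position, s = running offset
def pvFindB : List Int → Int → Int → String
  | [], _, _ => "Invalid_seat"
  | l :: rest, s, p =>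
      if p < s + l then (if p = s ∨ p = s + l - 1 then "A" else "M")
      else pvFindB rest (s + l) p

def pvClassifyB (widths : List Int) (total : Int) (c : Int) : String :=
  if c = 1 ∨ c = total then "W"
  else if 2 ≤ c ∧ c ≤ total - 1 then pvFindB widths 0 (c - 2)
  else "Invalid_seat"

def get_seat_type_from_seat_number_alt (seat_arrangement : List Int) (seatnumbers : List String) : List String :=
  let total := seat_arrangement.sum
  let widths := pvMutateB seat_arrangement
  seatnumbers.map (fun sn =>
    pvClassifyB widths total (pvToNumB ((PySem.Str.pyGet? sn (-1)).getD ' ')))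

-- ===== PRECONDITION & SPEC =====
-- Pre_ keeps the natural domain and excludes A's crashes: on an empty seat_arrangement or an
-- empty seat-number string A raises IndexError; non-positive section sizes lie outside the
-- natural domain of a seat arrangement (there Python's negative-index slice clamping, not the
-- seat layout, decides A's answer).
def Pre_get_seat_type_from_seat_number (seat_arrangement : List Int) (seatnumbers : List String) : Prop :=
  seat_arrangement ≠ [] ∧ (∀ x ∈ seat_arrangement, 1 ≤ x) ∧ (∀ s ∈ seatnumbers, s ≠ "")
instance (seat_arrangement : List Int) (seatnumbers : List String) : Decidable (Pre_get_seat_type_from_seat_number seat_arrangement seatnumbers) := by unfold Pre_get_seat_type_from_seat_number; infer_instance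

def pvWitness_get_seat_type_from_seat_number : List Int × List String :=
  ([3, 4, 3], ["1A", "2B", "10J", "5K"])

def Spec_get_seat_type_from_seat_number (seat_arrangement : List Int) (seatnumbers : List String) (out : List String) : Prop := out = get_seat_type_from_seat_number_alt seat_arrangement seatnumbers
instance (seat_arrangement : List Int) (seatnumbers : List String) (out : List String) : Decidable (Spec_get_seat_type_from_seat_number seat_arrangement seatnumbers out) := by unfold Spec_get_seat_type_from_seat_number; infer_instance

-- ===== CLAIM (what is proved, stated in full; the proofs are below) =====
def Claim_equal_get_seat_type_from_seat_number : Prop := ∀ (seat_arrangement : List Int) (seatnumbers : List String), Dom_get_seat_type_from_seat_number seat_arrangement seatnumbers → Pre_get_seat_type_from_seat_number seat_arrangement seatnumbers → Spec_get_seat_type_from_seat_number seat_arrangement seatnumbers (get_seat_type_from_seat_number seat_arrangement seatnumbers)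

-- ===== LEMMAS AND PROOFS =====

theorem pv_setD_neg_one (xs : List Int) (h : xs ≠ []) (v : Int) :
    PySem.List.pySetD xs (-1) v = xs.set (xs.length - 1) v := by
  have hl : 0 < xs.length := List.length_pos_iff.mpr h
  simp only [PySem.List.pySetD, PySem.List.pySet?, PySem.List.pyIdx?]
  have h2 : -(xs.length:Int) ≤ -1 := by omega
  simp [h2]

theorem pv_decLast_eq (xs : List Int) (h : xs ≠ []) :
    PySem.List.pySetD xs (-1) (PySem.List.pyGetD xs (-1) 0 - 1) = pvDecLastB xs := by
  rw [pv_setD_neg_one xs h, PySem.List.pyGetD_neg_one xs 0 h]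
  induction xs with
  | nil => simp at h
  | cons a rest ih =>
    cases rest with
    | nil => simp [pvDecLastB]
    | cons b t =>
      have hr : (b :: t) ≠ [] := by simp
      simp only [pvDecLastB, List.getLast_cons hr, List.length_cons]
      have h2 : (a :: b :: t).set (t.length + 1 + 1 - 1) ((b :: t).getLast hr - 1)
           = a :: (b :: t).set ((b :: t).length - 1) ((b :: t).getLast hr - 1) := by
        simp
      rw [h2, ih hr]

theorem pv_mutate_eq (sa : List Int) (h : sa ≠ []) :
    PySem.List.pySetD (PySem.List.pySetD sa 0 (PySem.List.pyGetD sa 0 0 - 1)) (-1)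
      (PySem.List.pyGetD (PySem.List.pySetD sa 0 (PySem.List.pyGetD sa 0 0 - 1)) (-1) 0 - 1)
      = pvMutateB sa := by
  cases sa with
  | nil => simp at h
  | cons a rest =>
    have h1 : PySem.List.pySetD (a :: rest) 0 (PySem.List.pyGetD (a :: rest) 0 0 - 1) = (a - 1) :: rest := by
      simp [PySem.List.pySetD, PySem.List.pySet?, PySem.List.pyIdx?, PySem.List.pyGetD_zero_cons, List.set]
    rw [h1, pv_decLast_eq _ (by simp)]
    cases rest with
    | nil => simp [pvDecLastB, pvMutateB]; ring
    | cons b t => simp [pvDecLastB, pvMutateB]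

theorem pv_decLast_sum (xs : List Int) (h : xs ≠ []) : (pvDecLastB xs).sum = xs.sum - 1 := by
  induction xs with
  | nil => simp at h
  | cons a rest ih =>
    cases rest with
    | nil => simp [pvDecLastB]
    | cons b t => simp [pvDecLastB, ih (by simp)]; ring

theorem pv_mutate_sum (sa : List Int) (h : sa ≠ []) : (pvMutateB sa).sum = sa.sum - 2 := by
  cases sa with
  | nil => simp at h
  | cons a rest =>
    cases rest with
    | nil => simp [pvMutateB]
    | cons b t =>
      simp [pvMutateB, pv_decLast_sum (b :: t) (by simp)]; ring

theorem pv_decLast_nonneg (xs : List Int) (h1 : ∀ x ∈ xs, 1 ≤ x) :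
    ∀ y ∈ pvDecLastB xs, 0 ≤ y := by
  induction xs with
  | nil => simp [pvDecLastB]
  | cons a rest ih =>
    cases rest with
    | nil =>
      simp [pvDecLastB]; have := h1 a (by simp); omega
    | cons b t =>
      intro y hy
      simp only [pvDecLastB, List.mem_cons] at hy
      rcases hy with h' | hy
      · have := h1 a (by simp); omega
      · exact ih (fun x hx => h1 x (List.mem_cons_of_mem a hx)) y hy

theorem pv_mutate_nonneg (sa : List Int) (h : sa ≠ []) (hne1 : sa ≠ [1])
    (h1 : ∀ x ∈ sa, 1 ≤ x) : ∀ y ∈ pvMutateB sa, 0 ≤ y := by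
  cases sa with
  | nil => simp at h
  | cons a rest =>
    cases rest with
    | nil =>
      have ha := h1 a (by simp)
      have : a ≠ 1 := by intro rfl_; simp [rfl_] at hne1
      simp [pvMutateB]; omega
    | cons b t =>
      intro y hy
      simp only [pvMutateB, List.mem_cons] at hy
      rcases hy with h' | hy
      · have := h1 a (by simp); omega
      · exact pv_decLast_nonneg (b :: t) (fun x hx => h1 x (List.mem_cons_of_mem a hx)) y hy

theorem pv_range_last (n : Int) (h : 1 ≤ n) :
    (PySem.List.pyGet? (PySem.List.pyRange 1 (n+1) 1) (-1)).getD 0 = n := by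
  rw [PySem.List.pyGet?_neg_one]
  rw [PySem.List.pyRange_one_succ_right (a := 1) (b := n) h]
  simp

-- generic endpoint filter: removing a's and (b-1)'s occurrences from range [a, b)

theorem pv_filter_range (a b : Int) (L : List Int) (hab : a < b)
    (hmem : ∀ x ∈ L, x < a ∨ x = a ∨ x = b - 1) (ha : a ∈ L) (hb : b - 1 ∈ L) :
    (PySem.List.pyRange a b 1).filter (fun i => !L.contains i)
      = PySem.List.pyRange (a+1) (b-1) 1 := by
  by_cases h1 : b = a + 1
  · subst h1
    rw [PySem.List.pyRange_one_singleton]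
    have : (a+1-1) = a := by ring
    simp [List.filter, ha]
  · have hsplit : PySem.List.pyRange a b 1
        = [a] ++ PySem.List.pyRange (a+1) (b-1) 1 ++ [b-1] := by
      rw [PySem.List.pyRange_one_append a (a+1) b (by omega) (by omega),
          PySem.List.pyRange_one_append (a+1) (b-1) b (by omega) (by omega),
          PySem.List.pyRange_one_singleton]
      have h3 : PySem.List.pyRange (b-1) b 1 = [b-1] := by
        have hx := PySem.List.pyRange_one_singleton (b-1)
        have hbb : (b-1) + 1 = b := by ring
        rw [hbb] at hx
        exact hx
      rw [h3]
      simp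
    rw [hsplit]
    rw [List.filter_append, List.filter_append]
    have hfa : ([a] : List Int).filter (fun i => !L.contains i) = [] := by
      simp [List.filter, ha]
    have hfb : ([b-1] : List Int).filter (fun i => !L.contains i) = [] := by
      simp [List.filter, hb]
    have hmid : (PySem.List.pyRange (a+1) (b-1) 1).filter (fun i => !L.contains i)
        = PySem.List.pyRange (a+1) (b-1) 1 := by
      apply List.filter_eq_self.mpr
      intro x hx
      rw [PySem.List.mem_pyRange_one] at hx
      simp only [Bool.not_eq_eq_eq_not, Bool.not_true, List.contains_eq_mem, decide_eq_false_iff_not]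
      intro hxl
      rcases hmem x hxl with h | h | h <;> omega
    rw [hfa, hfb, hmid]; simp

theorem pv_slice_range (a b s l : Int) (hs : 0 ≤ s) (hl : 0 ≤ l) (hb : a + s + l ≤ b) :
    PySem.List.slice (PySem.List.pyRange a b 1) (some s) (some (s + l))
      = PySem.List.pyRange (a + s) (a + s + l) 1 := by
  rw [PySem.List.slice_toNat _ hs (by omega)]
  rw [PySem.List.pyRange_one_append a (a+s) b (by omega) (by omega)]
  have h1 : (PySem.List.pyRange a (a+s) 1).length = s.toNat := by
    rw [PySem.List.length_pyRange_one]; omega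
  rw [← h1, List.drop_left]
  rw [PySem.List.pyRange_one_append (a+s) (a+s+l) b (by omega) (by omega)]
  have h3 : (s + l).toNat - (PySem.List.pyRange a (a+s) 1).length
      = (PySem.List.pyRange (a+s) (a+s+l) 1).length := by
    rw [h1, PySem.List.length_pyRange_one]; omega
  rw [h3, List.take_left]

theorem pv_if_AM_M (cond : Prop) [Decidable cond] :
    ((if cond then "A" else "M") = "M") ↔ ¬ cond := by
  split_ifs with h <;> simp [h]

theorem pv_if_AM_A (cond : Prop) [Decidable cond] :
    ((if cond then "A" else "M") = "A") ↔ cond := by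
  split_ifs with h <;> simp [h]

theorem pv_range_head (a b : Int) (h : a < b) :
    (PySem.List.pyGet? (PySem.List.pyRange a b 1) 0).getD 0 = a := by
  rw [PySem.List.pyRange_one_cons h, PySem.List.pyGet?_zero_cons]; rfl

theorem pv_range_last' (a b : Int) (h : a < b) :
    (PySem.List.pyGet? (PySem.List.pyRange a b 1) (-1)).getD 0 = b - 1 := by
  rw [PySem.List.pyGet?_neg_one]
  have hx := PySem.List.pyRange_one_succ_right (a := a) (b := b - 1) (by omega : a ≤ b - 1)
  have hbb : (b - 1) + 1 = b := by ring
  rw [hbb] at hx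
  rw [hx]
  simp

theorem pv_core (n : Int) (ls : List Int) (s : Int) (m0 a0 : List Int)
    (hl : ∀ l ∈ ls, 0 ≤ l) (hs : 0 ≤ s) (hb : s + ls.sum ≤ n - 2)
    (hm0 : ∀ x ∈ m0, x < s + 2) (ha0 : ∀ x ∈ a0, x < s + 2) (c : Int) :
    (c ∈ ((pvSliceListA (PySem.List.pyRange 2 n 1) ls s).foldl pvFoldA (m0, a0)).1
        ↔ c ∈ m0 ∨ (s + 2 ≤ c ∧ c - 2 < s + ls.sum ∧ pvFindB ls s (c-2) = "M"))
  ∧ (c ∈ ((pvSliceListA (PySem.List.pyRange 2 n 1) ls s).foldl pvFoldA (m0, a0)).2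
        ↔ c ∈ a0 ∨ (s + 2 ≤ c ∧ c - 2 < s + ls.sum ∧ pvFindB ls s (c-2) = "A")) := by
  induction ls generalizing s m0 a0 with
  | nil =>
    simp only [pvSliceListA, List.foldl_nil, List.sum_nil]
    refine ⟨⟨fun h => Or.inl h, ?_⟩, fun h => Or.inl h, ?_⟩ <;>
      · rintro (h | ⟨h1, h2, h3⟩)
        · exact h
        · omega
  | cons l rest ih =>
    have hl0 : 0 ≤ l := hl l (by simp)
    simp only [List.sum_cons] at hb
    have hrs : 0 ≤ rest.sum := List.sum_nonneg (fun x hx => hl x (by simp [hx]))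
    have hslice : PySem.List.slice (PySem.List.pyRange 2 n 1) (some s) (some (s + l))
        = PySem.List.pyRange (2 + s) (2 + s + l) 1 := by
      apply pv_slice_range 2 n s l hs hl0
      omega
    simp only [pvSliceListA, List.foldl_cons, hslice, List.sum_cons]
    by_cases hpos : 0 < l
    · -- non-empty section
      have hlen : (PySem.List.pyRange (2+s) (2+s+l) 1).length > 0 := by
        rw [PySem.List.length_pyRange_one]; omega
      have hhead : (PySem.List.pyGet? (PySem.List.pyRange (2+s) (2+s+l) 1) 0).getD 0 = s + 2 := by
        rw [pv_range_head _ _ (by omega)]; ring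
      have hlast : (PySem.List.pyGet? (PySem.List.pyRange (2+s) (2+s+l) 1) (-1)).getD 0 = s + l + 1 := by
        rw [pv_range_last' _ _ (by omega)]; ring
      have hfilter : (PySem.List.pyRange (2+s) (2+s+l) 1).filter
            (fun i => !(a0 ++ [s+2] ++ [s+l+1]).contains i)
          = PySem.List.pyRange (s+3) (s+l+1) 1 := by
        have := pv_filter_range (s+2) (s+l+2) (a0 ++ [s+2] ++ [s+l+1]) (by omega)
          (by intro x hx
              simp only [List.mem_append, List.mem_singleton] at hx
              rcases hx with (hx | hx) | hx
              · exact Or.inl (ha0 x hx)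
              · omega
              · right; right; omega)
          (by simp) (by simp only [List.mem_append, List.mem_singleton]; right; omega)
        have he : (2 + s : Int) = s + 2 := by ring
        have he2 : (2 + s + l : Int) = s + l + 2 := by ring
        rw [he2, he, this]
        congr 1 <;> ring
      rw [pvFoldA]
      simp only [hlen, if_pos, hhead, hlast, hfilter]
      have ihr := ih (s + l) (m0 ++ PySem.List.pyRange (s+3) (s+l+1) 1) (a0 ++ [s+2] ++ [s+l+1])
        (fun x hx => hl x (by simp [hx]))
        (by omega) (by omega)
        (by intro x hx
            simp only [List.mem_append] at hx
            rcases hx with hx | hx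
            · have := hm0 x hx; omega
            · rw [PySem.List.mem_pyRange_one] at hx; omega)
        (by intro x hx
            simp only [List.mem_append, List.mem_singleton] at hx
            rcases hx with (hx | hx) | hx
            · have := ha0 x hx; omega
            · omega
            · omega)
      rcases ihr with ⟨ih1, ih2⟩
      constructor
      · rw [ih1]
        simp only [List.mem_append, PySem.List.mem_pyRange_one]
        rw [pvFindB]
        constructor
        · rintro ((hm | hr) | ⟨h1, h2, h3⟩)
          · exact Or.inl hm
          · right
            refine ⟨by omega, by omega, ?_⟩
            rw [if_pos (by omega), pv_if_AM_M]; omega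
          · right
            refine ⟨by omega, by omega, ?_⟩
            rw [if_neg (by omega)]; exact h3
        · rintro (hm | ⟨h1, h2, h3⟩)
          · exact Or.inl (Or.inl hm)
          · by_cases hin : c - 2 < s + l
            · rw [if_pos hin, pv_if_AM_M] at h3
              left; right; omega
            · rw [if_neg hin] at h3
              right; exact ⟨by omega, by omega, h3⟩
      · rw [ih2]
        simp only [List.mem_append, List.mem_singleton]
        rw [pvFindB]
        constructor
        · rintro (((ha | hx) | hx) | ⟨h1, h2, h3⟩)
          · exact Or.inl ha
          · right
            refine ⟨by omega, by omega, ?_⟩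
            rw [if_pos (by omega), pv_if_AM_A]; omega
          · right
            refine ⟨by omega, by omega, ?_⟩
            rw [if_pos (by omega), pv_if_AM_A]; omega
          · right
            refine ⟨by omega, by omega, ?_⟩
            rw [if_neg (by omega)]; exact h3
        · rintro (ha | ⟨h1, h2, h3⟩)
          · exact Or.inl (Or.inl (Or.inl ha))
          · by_cases hin : c - 2 < s + l
            · rw [if_pos hin, pv_if_AM_A] at h3
              left; rcases h3 with h3 | h3
              · left; right; omega
              · right; omega
            · rw [if_neg hin] at h3
              right; exact ⟨by omega, by omega, h3⟩
    · -- l = 0 : empty section, fold skips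
      have hl0' : l = 0 := by omega
      subst hl0'
      have hnil : PySem.List.pyRange (2+s) (2+s+0) 1 = [] :=
        PySem.List.pyRange_one_eq_nil (by omega)
      rw [hnil, pvFoldA]
      simp only [List.length_nil, gt_iff_lt, lt_irrefl, if_false]
      have ihr := ih s m0 a0 (fun x hx => hl x (by simp [hx])) hs (by omega) hm0 ha0
      have hsz : s + 0 = s := by ring
      rcases ihr with ⟨ih1, ih2⟩
      rw [hsz]
      constructor
      · rw [ih1, pvFindB]
        constructor
        · rintro (hm | ⟨h1, h2, h3⟩)
          · exact Or.inl hm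
          · right; refine ⟨by omega, by omega, ?_⟩
            rw [if_neg (by omega), hsz]; exact h3
        · rintro (hm | ⟨h1, h2, h3⟩)
          · exact Or.inl hm
          · rw [if_neg (by omega), hsz] at h3
            right; exact ⟨by omega, by omega, h3⟩
      · rw [ih2, pvFindB]
        constructor
        · rintro (ha | ⟨h1, h2, h3⟩)
          · exact Or.inl ha
          · right; refine ⟨by omega, by omega, ?_⟩
            rw [if_neg (by omega), hsz]; exact h3
        · rintro (ha | ⟨h1, h2, h3⟩)
          · exact Or.inl ha
          · rw [if_neg (by omega), hsz] at h3
            right; exact ⟨by omega, by omega, h3⟩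

theorem pv_find_AM (ls : List Int) (s p : Int) (hl : ∀ l ∈ ls, 0 ≤ l)
    (hs : s ≤ p) (hp : p < s + ls.sum) :
    pvFindB ls s p = "A" ∨ pvFindB ls s p = "M" := by
  induction ls generalizing s with
  | nil => simp at hp; omega
  | cons l rest ih =>
    rw [pvFindB]
    by_cases hin : p < s + l
    · rw [if_pos hin]
      by_cases hc : p = s ∨ p = s + l - 1
      · rw [if_pos hc]; exact Or.inl rfl
      · rw [if_neg hc]; exact Or.inr rfl
    · rw [if_neg hin]
      simp only [List.sum_cons] at hp
      exact ih (s + l) (fun x hx => hl x (by simp [hx])) (by omega) (by omega)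

-- A's fold over the seat sections, as reached under Pre_ (used only by the proofs)
def pvArrangeA' (sa : List Int) : List Int × List Int :=
  (pvSliceListA (PySem.List.pyRange 2 sa.sum 1) (pvMutateB sa) 0).foldl pvFoldA ([], [])

theorem pv_arrange_eq (sa : List Int) (h : sa ≠ []) (h1 : ∀ x ∈ sa, 1 ≤ x) :
    pvArrangeA sa = ([1, sa.sum], (pvArrangeA' sa).1, (pvArrangeA' sa).2) := by
  have hn : 1 ≤ sa.sum := by
    obtain ⟨a, rest, rfl⟩ := List.exists_cons_of_ne_nil h
    have := h1 a (by simp)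
    have h2 : 0 ≤ rest.sum := List.sum_nonneg (fun x hx => by have := h1 x (by simp [hx]); omega)
    simp only [List.sum_cons]; omega
  simp only [pvArrangeA, pvArrangeA']
  rw [pv_range_last _ hn, pv_mutate_eq sa h]
  have hfil : (PySem.List.pyRange 1 (sa.sum + 1) 1).filter
        (fun i => !(([1] : List Int) ++ [sa.sum]).contains i)
      = PySem.List.pyRange 2 sa.sum 1 := by
    have hx := pv_filter_range 1 (sa.sum + 1) ([1] ++ [sa.sum]) (by omega)
      (by intro x hx
          simp only [List.mem_append, List.mem_singleton] at hx
          rcases hx with hx | hx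
          · right; left; simpa using hx
          · right; right; omega)
      (by simp) (by simp only [List.mem_append, List.mem_singleton]; right; omega)
    have he : (1:Int) + 1 = 2 := by norm_num
    have he2 : sa.sum + 1 - 1 = sa.sum := by ring
    rw [he, he2] at hx
    exact hx
  rw [hfil]
  simp

theorem pv_contains_iff (L : List Int) (c : Int) :
    ((PySem.Set.ofList L).contains c = true) ↔ c ∈ L := by
  simp [PySem.Set.mem_ofList]

theorem pv_sum_ge_one (sa : List Int) (h : sa ≠ []) (h1 : ∀ x ∈ sa, 1 ≤ x) : 1 ≤ sa.sum := by
  obtain ⟨a, rest, rfl⟩ := List.exists_cons_of_ne_nil h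
  have := h1 a (by simp)
  have h2 : 0 ≤ rest.sum := List.sum_nonneg (fun x hx => by have := h1 x (by simp [hx]); omega)
  simp only [List.sum_cons]; omega

theorem pv_classify_eq (sa : List Int) (h : sa ≠ []) (h1 : ∀ x ∈ sa, 1 ≤ x) (c : Int) :
    (if (PySem.Set.ofList (pvArrangeA sa).2.1).contains c then "M"
     else if (PySem.Set.ofList (pvArrangeA sa).2.2).contains c then "A"
     else if (PySem.Set.ofList (pvArrangeA sa).1).contains c then "W"
     else "Invalid_seat")
    = pvClassifyB (pvMutateB sa) sa.sum c := by
  have hn : 1 ≤ sa.sum := pv_sum_ge_one sa h h1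
  have hwin : (pvArrangeA sa).1 = [1, sa.sum] := by rw [pv_arrange_eq sa h h1]
  have hmid : (pvArrangeA sa).2.1 = (pvArrangeA' sa).1 := by rw [pv_arrange_eq sa h h1]
  have hais : (pvArrangeA sa).2.2 = (pvArrangeA' sa).2 := by rw [pv_arrange_eq sa h h1]
  rw [hwin, hmid, hais]
  by_cases hsa : sa = [1]
  · subst hsa
    have hMA : pvArrangeA' [1] = ([], []) := by decide
    rw [hMA]
    simp only [List.sum_cons, List.sum_nil]
    rw [pvClassifyB]
    by_cases hc : c = 1
    · subst hc
      rw [if_neg (by rw [pv_contains_iff]; simp),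
          if_neg (by rw [pv_contains_iff]; simp),
          if_pos (by rw [pv_contains_iff]; norm_num),
          if_pos (by norm_num)]
    · rw [if_neg (by rw [pv_contains_iff]; simp),
          if_neg (by rw [pv_contains_iff]; simp),
          if_neg (by rw [pv_contains_iff]; simp; omega),
          if_neg (by omega), if_neg (by omega)]
  · have hnn : ∀ y ∈ pvMutateB sa, 0 ≤ y := pv_mutate_nonneg sa h hsa h1
    have hsum : (pvMutateB sa).sum = sa.sum - 2 := pv_mutate_sum sa h
    have hcore := pv_core sa.sum (pvMutateB sa) 0 [] [] hnn le_rfl (by omega)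
      (by simp) (by simp) c
    rcases hcore with ⟨hM, hA⟩
    simp only [List.not_mem_nil, false_or] at hM hA
    rw [pvClassifyB]
    have hMc : ((PySem.Set.ofList (pvArrangeA' sa).1).contains c = true)
        ↔ (0 + 2 ≤ c ∧ c - 2 < 0 + (pvMutateB sa).sum ∧ pvFindB (pvMutateB sa) 0 (c - 2) = "M") := by
      rw [pv_contains_iff, pvArrangeA']; exact hM
    have hAc : ((PySem.Set.ofList (pvArrangeA' sa).2).contains c = true)
        ↔ (0 + 2 ≤ c ∧ c - 2 < 0 + (pvMutateB sa).sum ∧ pvFindB (pvMutateB sa) 0 (c - 2) = "A") := by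
      rw [pv_contains_iff, pvArrangeA']; exact hA
    by_cases hw : c = 1 ∨ c = sa.sum
    · rw [if_neg (by rw [hMc]; omega), if_neg (by rw [hAc]; omega),
          if_pos (by rw [pv_contains_iff]; rcases hw with hw | hw <;> simp [hw]),
          if_pos hw]
    · by_cases hint : 2 ≤ c ∧ c ≤ sa.sum - 1
      · rcases pv_find_AM (pvMutateB sa) 0 (c - 2) hnn (by omega) (by omega)
          with hf | hf
        · rw [if_neg (by rw [hMc, hf]; intro hx; exact absurd hx.2.2 (by decide)),
              if_pos (by rw [hAc]; exact ⟨by omega, by omega, hf⟩),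
              if_neg hw, if_pos hint, hf]
        · rw [if_pos (by rw [hMc]; exact ⟨by omega, by omega, hf⟩),
              if_neg hw, if_pos hint, hf]
      · rw [if_neg (by rw [hMc]; omega), if_neg (by rw [hAc]; omega),
          if_neg (by rw [pv_contains_iff]; simp; omega),
          if_neg hw, if_neg hint]

theorem pv_main (sa : List Int) (sns : List String)
    (hpre : Pre_get_seat_type_from_seat_number sa sns) :
    get_seat_type_from_seat_number sa sns = get_seat_type_from_seat_number_alt sa sns := by
  obtain ⟨h, h1, -⟩ := hpre
  unfold get_seat_type_from_seat_number get_seat_type_from_seat_number_alt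
  refine List.map_congr_left ?_
  intro sn _
  exact pv_classify_eq sa h h1 (pvToNumA ((PySem.Str.pyGet? sn (-1)).getD ' '))

-- ===== VERDICT (by name: the statement is the Claim_ definition above) =====
theorem get_seat_type_from_seat_number_spec : Claim_equal_get_seat_type_from_seat_number := by
  intro seat_arrangement seatnumbers _ hpre
  exact pv_main seat_arrangement seatnumbers hpre
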